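-- pv_equiv track=rewrite | github.com/coolmay/hpcpack-acm | src/Diagnostics/diags-map-reduce-1.0.x.py | mpiPingpongGetLargestNonoverlappingGroups
-- ===== SOURCE A (Python) =====
-- def mpiPingpongGetLargestNonoverlappingGroups(groups):
--     largestGroups = []
--     visitedNodes = set()
--     while len(groups):
--         maxLen = max([len(group) for group in groups])
--         largestGroup = [group for group in groups if len(group) == maxLen][0]
--         largestGroups.append(largestGroup)
--         visitedNodes.update(largestGroup)
--         groupsToRemove = []
--         for group in groups:
--             for node in group:
--                 if node in visitedNodes:
--                     groupsToRemove.append(group)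
--                     break
--         groups = [group for group in groups if group not in groupsToRemove]
--     return largestGroups
-- ===== SOURCE B (Python) =====
-- def mpiPingpongGetLargestNonoverlappingGroups(groups):
--     largestGroups = []
--     visitedNodes = set()
--     for group in sorted(groups, key=len, reverse=True):
--         if all(node not in visitedNodes for node in group):
--             largestGroups.append(group)
--             visitedNodes.update(group)
--     return largestGroups
-- ===== Notes on version B (the rewrite author's own statement) =====
-- stated objective: faster
-- what changed: Replaces A's quadratic loop (rescan for the max-length group, rebuild a removal list and re-filter the whole list on every iteration) by one stable sort by descending length followed by a single greedy pass with a visited-node set.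
import Mathlib
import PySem

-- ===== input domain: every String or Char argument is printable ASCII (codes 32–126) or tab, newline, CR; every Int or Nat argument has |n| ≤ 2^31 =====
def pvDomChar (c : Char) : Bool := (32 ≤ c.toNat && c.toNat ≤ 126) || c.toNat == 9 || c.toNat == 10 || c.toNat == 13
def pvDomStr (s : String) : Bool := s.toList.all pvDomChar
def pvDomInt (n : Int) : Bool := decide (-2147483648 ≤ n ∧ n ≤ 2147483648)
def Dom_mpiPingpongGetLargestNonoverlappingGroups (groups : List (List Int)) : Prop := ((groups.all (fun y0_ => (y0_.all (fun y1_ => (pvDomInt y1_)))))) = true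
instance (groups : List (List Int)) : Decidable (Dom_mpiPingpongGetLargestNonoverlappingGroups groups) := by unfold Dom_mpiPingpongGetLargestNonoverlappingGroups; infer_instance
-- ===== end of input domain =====

-- B replaces A's repeated max-scan-and-remove loop by one stable descending sort by length
-- followed by a single greedy pass with a visited set (objective: faster).

-- ===== PORT A =====
-- The while loop is ported with fuel groups.length + 1: when every group is nonempty, each
-- iteration removes at least the picked group, so the fuel is never exhausted on Pre_ inputs.
def pvALoop : Nat → List (List Int) → List (List Int) → PySem.Set Int → List (List Int)
  | 0, _, largestGroups, _ => largestGroups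
  | fuel + 1, groups, largestGroups, visitedNodes =>
    if groups = [] then largestGroups
    else
      let maxLen : Int := (PySem.List.max? (groups.map (fun group => (group.length : Int))) (fun x => x)).getD 0
      let largestGroup : List Int := (groups.filter (fun group => decide ((group.length : Int) = maxLen))).headD []
      let largestGroups' := largestGroups ++ [largestGroup]
      let visitedNodes' := PySem.Set.update visitedNodes largestGroup
      let groupsToRemove := groups.foldl
        (fun acc group => if group.any (fun node => PySem.Set.contains visitedNodes' node) then acc ++ [group] else acc)
        ([] : List (List Int))
      let groups' := groups.filter (fun group => !(decide (group ∈ groupsToRemove)))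
      pvALoop fuel groups' largestGroups' visitedNodes'

def mpiPingpongGetLargestNonoverlappingGroups (groups : List (List Int)) : List (List Int) :=
  pvALoop (groups.length + 1) groups [] PySem.Set.empty

-- ===== PORT B =====
def mpiPingpongGetLargestNonoverlappingGroups_alt (groups : List (List Int)) : List (List Int) :=
  ((PySem.List.sorted groups (fun group => (group.length : Int)) true).foldl
    (fun st group =>
      if group.all (fun node => !(PySem.Set.contains st.2 node)) then
        (st.1 ++ [group], PySem.Set.update st.2 group)
      else st)
    (([] : List (List Int)), (PySem.Set.empty : PySem.Set Int))).1

-- ===== PRECONDITION & SPEC =====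
-- Pre_ excludes inputs containing an empty group: an empty group is never removed, so A's
-- while loop never terminates there (A returns on no such input).
def Pre_mpiPingpongGetLargestNonoverlappingGroups (groups : List (List Int)) : Prop :=
  ∀ g ∈ groups, g ≠ []
instance (groups : List (List Int)) : Decidable (Pre_mpiPingpongGetLargestNonoverlappingGroups groups) := by
  unfold Pre_mpiPingpongGetLargestNonoverlappingGroups; infer_instance
def pvWitness_mpiPingpongGetLargestNonoverlappingGroups : List (List Int) := [[1, 2], [2, 3], [4]]

def Spec_mpiPingpongGetLargestNonoverlappingGroups (groups : List (List Int)) (out : List (List Int)) : Prop := out = mpiPingpongGetLargestNonoverlappingGroups_alt groups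
instance (groups : List (List Int)) (out : List (List Int)) : Decidable (Spec_mpiPingpongGetLargestNonoverlappingGroups groups out) := by unfold Spec_mpiPingpongGetLargestNonoverlappingGroups; infer_instance

-- ===== CLAIM (what is proved, stated in full; the proofs are below) =====
def Claim_equal_mpiPingpongGetLargestNonoverlappingGroups : Prop := ∀ (groups : List (List Int)), Dom_mpiPingpongGetLargestNonoverlappingGroups groups → Pre_mpiPingpongGetLargestNonoverlappingGroups groups → Spec_mpiPingpongGetLargestNonoverlappingGroups groups (mpiPingpongGetLargestNonoverlappingGroups groups)

-- ===== LEMMAS AND PROOFS =====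

-- the insertion step of Python's stable descending sort by length
def pvIns (acc : List (List Int)) (x : List Int) : List (List Int) :=
  PySem.List.insertBy (fun a b => decide ((b.length : Int) < (a.length : Int))) x acc

lemma pvSortedDescEq (xs : List (List Int)) :
    PySem.List.sorted xs (fun g => (g.length : Int)) true = xs.foldl pvIns [] := by
  rw [PySem.List.sorted_rev_eq_foldl_insertBy]; rfl

-- ghost greedy pass over an abstract visited predicate
def pvPass : List (List Int) → (Int → Bool) → List (List Int)
  | [], _ => []
  | g :: L, v =>
    if g.all (fun n => !(v n)) then g :: pvPass L (fun n => v n || g.contains n)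
    else pvPass L v

lemma pvMemUpdate (g : List Int) (s : PySem.Set Int) (n : Int) :
    n ∈ PySem.Set.update s g ↔ n ∈ s ∨ n ∈ g := by
  induction g generalizing s with
  | nil => simp [PySem.Set.update]
  | cons x xs ih =>
    simp only [PySem.Set.update, List.foldl_cons] at *
    rw [ih]
    by_cases hx : PySem.Set.contains s x = true
    · simp only [PySem.Set.add, if_pos hx]
      have : x ∈ s := by simpa [PySem.Set.contains] using hx
      constructor
      · rintro (h | h)
        · exact Or.inl h
        · exact Or.inr (List.mem_cons_of_mem _ h)
      · rintro (h | h)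
        · exact Or.inl h
        · rcases List.mem_cons.mp h with rfl | h
          · exact Or.inl this
          · exact Or.inr h
    · simp only [PySem.Set.add, if_neg hx, List.mem_append, List.mem_singleton, List.mem_cons]
      tauto

lemma pvContainsUpdate (g : List Int) (s : PySem.Set Int) (n : Int) :
    PySem.Set.contains (PySem.Set.update s g) n = (PySem.Set.contains s n || g.contains n) := by
  simp only [PySem.Set.contains, List.contains_eq_mem]
  by_cases h1 : n ∈ s <;> by_cases h2 : n ∈ g <;> simp [pvMemUpdate, h1, h2]

lemma pvContainsEmpty (n : Int) : PySem.Set.contains (PySem.Set.empty : PySem.Set Int) n = false := rfl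

-- inserting an element whose key is strictly larger than every key in a list puts it in front
lemma pvInsertByAllLt (x : List Int) (l : List (List Int))
    (h : ∀ z ∈ l, (z.length : Int) < (x.length : Int)) :
    pvIns l x = x :: l := by
  cases l with
  | nil => rfl
  | cons y ys =>
    have hy : (y.length : Int) < (x.length : Int) := h y (List.mem_cons_self)
    simp [pvIns, PySem.List.insertBy, hy]

-- an element at the front whose key dominates everything still to be inserted stays in front
lemma pvFoldlInsConsTop (post : List (List Int)) (acc : List (List Int)) (g : List Int)
    (h : ∀ z ∈ post, (z.length : Int) ≤ (g.length : Int)) :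
    post.foldl pvIns (g :: acc) = g :: post.foldl pvIns acc := by
  induction post generalizing acc with
  | nil => rfl
  | cons z zs ih =>
    have hz : ¬ ((g.length : Int) < (z.length : Int)) :=
      not_lt.mpr (h z (List.mem_cons_self))
    simp only [List.foldl_cons]
    have : pvIns (g :: acc) z = g :: pvIns acc z := by
      simp [pvIns, PySem.List.insertBy, hz]
    rw [this, ih _ (fun w hw => h w (List.mem_cons_of_mem _ hw))]

-- insertion preserves descending pairwise order
lemma pvPairwiseInsertBy (acc : List (List Int)) (x : List Int)
    (h : acc.Pairwise (fun a b => (b.length : Int) ≤ (a.length : Int))) :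
    (pvIns acc x).Pairwise (fun a b => (b.length : Int) ≤ (a.length : Int)) := by
  induction acc with
  | nil => simp [pvIns, PySem.List.insertBy]
  | cons y ys ih =>
    rcases List.pairwise_cons.mp h with ⟨hy, hys⟩
    by_cases hc : (y.length : Int) < (x.length : Int)
    · have : pvIns (y :: ys) x = x :: y :: ys := by simp [pvIns, PySem.List.insertBy, hc]
      rw [this]
      refine List.pairwise_cons.mpr ⟨?_, h⟩
      intro z hz
      rcases List.mem_cons.mp hz with rfl | hz
      · exact le_of_lt hc
      · exact le_trans (hy z hz) (le_of_lt hc)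
    · have : pvIns (y :: ys) x = y :: pvIns ys x := by simp [pvIns, PySem.List.insertBy, hc]
      rw [this]
      refine List.pairwise_cons.mpr ⟨?_, ih hys⟩
      intro z hz
      rcases (PySem.List.mem_insertBy _ _ _ _).mp hz with rfl | hz
      · exact not_lt.mp hc
      · exact hy z hz

-- filtering commutes with insertion into a descending-sorted list
lemma pvFilterInsertBy (acc : List (List Int)) (x : List Int) (p : List Int → Bool)
    (h : acc.Pairwise (fun a b => (b.length : Int) ≤ (a.length : Int))) :
    (pvIns acc x).filter p = if p x then pvIns (acc.filter p) x else acc.filter p := by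
  induction acc with
  | nil =>
    by_cases hp : p x <;> simp [pvIns, PySem.List.insertBy, hp]
  | cons y ys ih =>
    rcases List.pairwise_cons.mp h with ⟨hy, hys⟩
    by_cases hc : (y.length : Int) < (x.length : Int)
    · have hx : pvIns (y :: ys) x = x :: y :: ys := by simp [pvIns, PySem.List.insertBy, hc]
      rw [hx]
      by_cases hp : p x
      · by_cases hpy : p y
        · simp only [List.filter_cons, hp, hpy, if_pos, ite_true]
          have : pvIns (y :: List.filter p ys) x = x :: y :: List.filter p ys := by
            simp [pvIns, PySem.List.insertBy, hc]
          simp [hp, hpy, List.filter_cons, this]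
        · have hfl : pvIns (List.filter p ys) x = x :: List.filter p ys := by
            apply pvInsertByAllLt
            intro z hz
            exact lt_of_le_of_lt (hy z (List.mem_of_mem_filter hz)) hc
          simp [hp, hpy, List.filter_cons, hfl]
      · simp [hp, List.filter_cons]
    · have hx : pvIns (y :: ys) x = y :: pvIns ys x := by simp [pvIns, PySem.List.insertBy, hc]
      rw [hx]
      by_cases hp : p x
      · by_cases hpy : p y
        · have h2 : pvIns (y :: List.filter p ys) x = y :: pvIns (List.filter p ys) x := by
            simp [pvIns, PySem.List.insertBy, hc]
          rw [if_pos hp, List.filter_cons, if_pos hpy, List.filter_cons, if_pos hpy, h2,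
            ih hys, if_pos hp]
        · rw [if_pos hp, List.filter_cons, if_neg hpy, List.filter_cons, if_neg hpy,
            ih hys, if_pos hp]
      · by_cases hpy : p y
        · rw [if_neg hp, List.filter_cons, if_pos hpy, List.filter_cons, if_pos hpy,
            ih hys, if_neg hp]
        · rw [if_neg hp, List.filter_cons, if_neg hpy, List.filter_cons, if_neg hpy,
            ih hys, if_neg hp]

lemma pvFoldlFilter (xs : List (List Int)) (acc : List (List Int)) (p : List Int → Bool)
    (h : acc.Pairwise (fun a b => (b.length : Int) ≤ (a.length : Int))) :
    (xs.foldl pvIns acc).filter p = (xs.filter p).foldl pvIns (acc.filter p) := by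
  induction xs generalizing acc with
  | nil => rfl
  | cons x xs ih =>
    simp only [List.foldl_cons, List.filter_cons]
    rw [ih _ (pvPairwiseInsertBy _ _ h), pvFilterInsertBy _ _ _ h]
    by_cases hp : p x <;> simp [hp]

lemma pvFilterSorted (xs : List (List Int)) (p : List Int → Bool) :
    (PySem.List.sorted xs (fun g => (g.length : Int)) true).filter p
      = PySem.List.sorted (xs.filter p) (fun g => (g.length : Int)) true := by
  rw [pvSortedDescEq, pvSortedDescEq]
  exact pvFoldlFilter xs [] p List.Pairwise.nil

-- the stable descending sort of pre ++ g :: post, with g a first group of maximal length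
lemma pvSortedDescCons (pre post : List (List Int)) (g : List Int)
    (hpre : ∀ y ∈ pre, (y.length : Int) < (g.length : Int))
    (hpost : ∀ y ∈ post, (y.length : Int) ≤ (g.length : Int)) :
    PySem.List.sorted (pre ++ g :: post) (fun h => (h.length : Int)) true
      = g :: PySem.List.sorted (pre ++ post) (fun h => (h.length : Int)) true := by
  rw [pvSortedDescEq, pvSortedDescEq, List.foldl_append, List.foldl_append, List.foldl_cons]
  have hmem : ∀ z ∈ pre.foldl pvIns [], (z.length : Int) < (g.length : Int) := by
    intro z hz
    apply hpre
    have : z ∈ PySem.List.sorted pre (fun h => (h.length : Int)) true := by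
      rw [pvSortedDescEq]; exact hz
    exact (PySem.List.mem_sorted _ _ _ _).mp this
  rw [show pvIns (pre.foldl pvIns []) g = g :: pre.foldl pvIns [] from pvInsertByAllLt _ _ hmem]
  exact pvFoldlInsConsTop post _ g hpost

-- skipping every group that meets v during the pass = removing those groups beforehand
lemma pvPassSplit (L : List (List Int)) (v w : Int → Bool) :
    pvPass L (fun n => v n || w n)
      = pvPass (L.filter (fun h => h.all (fun n => !(v n)))) w := by
  induction L generalizing w with
  | nil => rfl
  | cons g L ih =>
    by_cases hv : g.all (fun n => !(v n))
    · by_cases hw : g.all (fun n => !(w n))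
      · have hc : g.all (fun n => !(v n || w n)) = true := by
          simp only [List.all_eq_true] at hv hw ⊢
          intro n hn
          simp [hv n hn, hw n hn]
        have h1 : pvPass (g :: L) (fun n => v n || w n)
            = g :: pvPass L (fun n => (v n || w n) || g.contains n) := by
          simp only [pvPass]; rw [if_pos hc]
        have h2 : (fun n => (v n || w n) || g.contains n)
            = (fun n => v n || (w n || g.contains n)) := by
          funext n; exact Bool.or_assoc _ _ _
        have h3 : (g :: L).filter (fun h => h.all (fun n => !(v n)))
            = g :: L.filter (fun h => h.all (fun n => !(v n))) := by
          rw [List.filter_cons, if_pos hv]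
        have h4 : pvPass (g :: L.filter (fun h => h.all (fun n => !(v n)))) w
            = g :: pvPass (L.filter (fun h => h.all (fun n => !(v n)))) (fun n => w n || g.contains n) := by
          simp only [pvPass]; rw [if_pos hw]
        rw [h1, h2, ih (fun n => w n || g.contains n), h3, h4]
      · have hwit : ∃ n ∈ g, w n = true := by simpa using hw
        have hc : g.all (fun n => !(v n || w n)) = false := by
          rcases hwit with ⟨n, hn, hwn⟩
          apply List.all_eq_false.mpr
          exact ⟨n, hn, by simp [hwn]⟩
        have h1 : pvPass (g :: L) (fun n => v n || w n) = pvPass L (fun n => v n || w n) := by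
          simp only [pvPass]; rw [if_neg (by rw [hc]; exact Bool.false_ne_true)]
        have h3 : (g :: L).filter (fun h => h.all (fun n => !(v n)))
            = g :: L.filter (fun h => h.all (fun n => !(v n))) := by
          rw [List.filter_cons, if_pos hv]
        have h4 : pvPass (g :: L.filter (fun h => h.all (fun n => !(v n)))) w
            = pvPass (L.filter (fun h => h.all (fun n => !(v n)))) w := by
          simp only [pvPass]; rw [if_neg hw]
        rw [h1, ih w, h3, h4]
    · have hwit : ∃ n ∈ g, v n = true := by simpa using hv
      have hc : g.all (fun n => !(v n || w n)) = false := by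
        rcases hwit with ⟨n, hn, hvn⟩
        apply List.all_eq_false.mpr
        exact ⟨n, hn, by simp [hvn]⟩
      have h1 : pvPass (g :: L) (fun n => v n || w n) = pvPass L (fun n => v n || w n) := by
        simp only [pvPass]; rw [if_neg (by rw [hc]; exact Bool.false_ne_true)]
      have h3 : (g :: L).filter (fun h => h.all (fun n => !(v n)))
          = L.filter (fun h => h.all (fun n => !(v n))) := by
        rw [List.filter_cons, if_neg hv]
      rw [h1, ih w, h3]

-- B's fold is the ghost pass
lemma pvBridgeB (L : List (List Int)) (acc : List (List Int)) (s : PySem.Set Int) :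
    (L.foldl
      (fun st group =>
        if group.all (fun node => !(PySem.Set.contains st.2 node)) then
          (st.1 ++ [group], PySem.Set.update st.2 group)
        else st)
      (acc, s)).1 = acc ++ pvPass L (fun n => PySem.Set.contains s n) := by
  induction L generalizing acc s with
  | nil => simp [pvPass]
  | cons g L ih =>
    simp only [List.foldl_cons]
    by_cases hc : g.all (fun node => !(PySem.Set.contains s node))
    · rw [if_pos hc]
      rw [ih]
      have hv : (fun n => PySem.Set.contains (PySem.Set.update s g) n)
          = (fun n => PySem.Set.contains s n || g.contains n) := funext (pvContainsUpdate g s)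
      rw [hv]
      have hpass : pvPass (g :: L) (fun n => PySem.Set.contains s n)
          = g :: pvPass L (fun n => PySem.Set.contains s n || g.contains n) := by
        simp only [pvPass]; rw [if_pos hc]
      rw [hpass, List.append_assoc, List.singleton_append]
    · rw [if_neg hc]
      rw [ih]
      have hpass : pvPass (g :: L) (fun n => PySem.Set.contains s n)
          = pvPass L (fun n => PySem.Set.contains s n) := by
        simp only [pvPass]; rw [if_neg hc]
      rw [hpass]

-- main invariant: A's loop produces exactly B's greedy pass over the sorted remainder
lemma pvMain (fuel : Nat) (gs acc : List (List Int)) (s : PySem.Set Int)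
    (hne : ∀ g ∈ gs, g ≠ [])
    (hinv : ∀ g ∈ gs, ∀ n ∈ g, PySem.Set.contains s n = false)
    (hfuel : gs.length < fuel) :
    pvALoop fuel gs acc s
      = acc ++ pvPass (PySem.List.sorted gs (fun g => (g.length : Int)) true) (fun _ => false) := by
  induction fuel generalizing gs acc s with
  | zero => omega
  | succ f ih =>
    by_cases hgs : gs = []
    · subst hgs
      have : PySem.List.sorted ([] : List (List Int)) (fun g => (g.length : Int)) true = [] := by
        rw [PySem.List.sorted_eq_nil_iff]
      simp [pvALoop, this, pvPass]
    · -- one iteration of A's while loop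
      cases hmax : PySem.List.max? (gs.map (fun group => (group.length : Int))) (fun x => x) with
      | none =>
        exfalso
        exact hgs (by simpa using (PySem.List.max?_eq_none_iff _ _).mp hmax)
      | some m =>
      have hmMem : m ∈ gs.map (fun group => (group.length : Int)) := PySem.List.max?_mem hmax
      have hmMax : ∀ y ∈ gs.map (fun group => (group.length : Int)), y ≤ m := by
        intro y hy; exact PySem.List.max?_isMax hmax y hy
      rcases List.mem_map.mp hmMem with ⟨g0, hg0, hg0m⟩
      have hFne : gs.filter (fun h => decide ((h.length : Int) = m)) ≠ [] := by
        intro hF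
        have : g0 ∈ gs.filter (fun h => decide ((h.length : Int) = m)) :=
          List.mem_filter.mpr ⟨hg0, by simp [hg0m]⟩
        rw [hF] at this; exact absurd this (List.not_mem_nil)
      cases hF : gs.filter (fun h => decide ((h.length : Int) = m)) with
      | nil => exact absurd hF hFne
      | cons g rest =>
      rcases List.filter_eq_cons_iff.mp hF with ⟨pre, post, hdec, hpreNe, hgm', hrest⟩
      have hgm : (g.length : Int) = m := of_decide_eq_true hgm'
      have hgmem : g ∈ gs := by rw [hdec]; simp
      have hpre : ∀ y ∈ pre, (y.length : Int) < (g.length : Int) := by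
        intro y hy
        have hle : (y.length : Int) ≤ m := by
          apply hmMax
          exact List.mem_map.mpr ⟨y, by rw [hdec]; simp [hy], rfl⟩
        have hne' : ¬ ((y.length : Int) = m) := by
          intro h; exact hpreNe y hy (by simp [h])
        rw [hgm]; exact lt_of_le_of_ne hle hne'
      have hpost : ∀ y ∈ post, (y.length : Int) ≤ (g.length : Int) := by
        intro y hy
        rw [hgm]
        apply hmMax
        exact List.mem_map.mpr ⟨y, by rw [hdec]; simp [hy], rfl⟩
      have hgne : g ≠ [] := hne g hgmem
      -- unfold one step of the loop
      simp only [pvALoop]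
      rw [if_neg hgs]
      simp only [hmax, Option.getD_some, hF, List.headD_cons]
      -- the removal loop builds a filter
      rw [PySem.List.foldl_append_if_eq_filter
        (fun group => group.any (fun node => PySem.Set.contains (PySem.Set.update s g) node)) gs []]
      rw [List.nil_append]
      -- the surviving groups are exactly those disjoint from g
      have hstep :
          gs.filter (fun group => !(decide (group ∈ gs.filter
              (fun group => group.any (fun node => PySem.Set.contains (PySem.Set.update s g) node)))))
            = gs.filter (fun h => h.all (fun n => !(g.contains n))) := by
        apply List.filter_congr
        intro h hmem
        have h1 : decide (h ∈ gs.filter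
            (fun group => group.any (fun node => PySem.Set.contains (PySem.Set.update s g) node)))
            = h.any (fun node => PySem.Set.contains (PySem.Set.update s g) node) := by
          cases hq : h.any (fun node => PySem.Set.contains (PySem.Set.update s g) node)
          · exact decide_eq_false (fun hx => by
              have hx2 := (List.mem_filter.mp hx).2
              rw [hq] at hx2; cases hx2)
          · exact decide_eq_true (List.mem_filter.mpr ⟨hmem, hq⟩)
        rw [h1]
        have h2 : h.any (fun node => PySem.Set.contains (PySem.Set.update s g) node)
            = h.any (fun n => g.contains n) := by
          cases hb : h.any (fun n => g.contains n)
          · apply List.any_eq_false.mpr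
            intro n hn
            rw [pvContainsUpdate, hinv h hmem n hn, Bool.false_or]
            intro hgc
            have : h.any (fun n => g.contains n) = true :=
              List.any_eq_true.mpr ⟨n, hn, by simpa using hgc⟩
            rw [hb] at this; cases this
          · rcases List.any_eq_true.mp hb with ⟨n, hn, hgc⟩
            apply List.any_eq_true.mpr
            exact ⟨n, hn, by rw [pvContainsUpdate, hinv h hmem n hn, Bool.false_or]; simpa using hgc⟩
        rw [h2]
        cases hany : h.any (fun n => g.contains n)
        · have hall : h.all (fun n => !(g.contains n)) = true := by
            apply List.all_eq_true.mpr
            intro n hn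
            have hb : g.contains n = false := by
              cases hgc : g.contains n
              · rfl
              · exfalso
                have : h.any (fun n => g.contains n) = true :=
                  List.any_eq_true.mpr ⟨n, hn, by simpa using hgc⟩
                rw [hany] at this; cases this
            rw [hb]; rfl
          rw [hall]; rfl
        · have hall : h.all (fun n => !(g.contains n)) = false := by
            rcases List.any_eq_true.mp hany with ⟨n, hn, hgc⟩
            apply List.all_eq_false.mpr
            exact ⟨n, hn, by simpa using hgc⟩
          rw [hall]; rfl
      rw [hstep]
      -- the picked group does not survive
      have hPGg : g.all (fun n => !(g.contains n)) = false := by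
        rcases List.exists_mem_of_ne_nil g hgne with ⟨n0, hn0⟩
        apply List.all_eq_false.mpr
        exact ⟨n0, hn0, by simpa using hn0⟩
      -- apply the induction hypothesis to the surviving groups
      have hlen : (gs.filter (fun h => h.all (fun n => !(g.contains n)))).length < gs.length :=
        List.length_filter_lt_length_iff_exists.mpr ⟨g, hgmem, by rw [hPGg]; exact Bool.false_ne_true⟩
      rw [ih _ _ _
        (fun h hm => hne h (List.mem_of_mem_filter hm))
        (by
          intro h hm n hn
          have hmem : h ∈ gs := List.mem_of_mem_filter hm
          have hall : h.all (fun n => !(g.contains n)) = true := (List.mem_filter.mp hm).2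
          rw [pvContainsUpdate, hinv h hmem n hn, Bool.false_or]
          have hb : g.contains n = false := by
            cases hgc : g.contains n
            · rfl
            · exfalso
              have hfalse : h.all (fun n => !(g.contains n)) = false := by
                apply List.all_eq_false.mpr
                exact ⟨n, hn, by simpa using hgc⟩
              rw [hall] at hfalse; cases hfalse
          exact hb)
        (by omega)]
      -- now rewrite the right-hand side
      rw [hdec, pvSortedDescCons pre post g hpre hpost]
      have hpassHead :
          pvPass (g :: PySem.List.sorted (pre ++ post) (fun h => (h.length : Int)) true) (fun _ => false)
            = g :: pvPass (PySem.List.sorted (pre ++ post) (fun h => (h.length : Int)) true)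
                (fun n => g.contains n || false) := by
        -- head is taken: nothing is visited yet
        have hcond : g.all (fun n => !((fun (_ : Int) => false) n)) = true := by simp
        simp only [pvPass]
        rw [if_pos hcond]
        have hfun : (fun n => false || g.contains n) = (fun n => g.contains n || false) := by
          funext n; simp
        rw [hfun]
      rw [hpassHead, pvPassSplit _ (fun n => g.contains n) (fun _ => false), pvFilterSorted]
      have hfilters : (pre ++ post).filter (fun h => h.all (fun n => !(g.contains n)))
          = (pre ++ g :: post).filter (fun h => h.all (fun n => !(g.contains n))) := by
        rw [List.filter_append, List.filter_append, List.filter_cons, if_neg (by rw [hPGg]; exact Bool.false_ne_true)]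
      rw [hfilters, ← hdec]
      simp

-- ===== VERDICT (by name: the statement is the Claim_ definition above) =====
theorem mpiPingpongGetLargestNonoverlappingGroups_spec : Claim_equal_mpiPingpongGetLargestNonoverlappingGroups := by
  intro groups _ hpre
  unfold Spec_mpiPingpongGetLargestNonoverlappingGroups
  unfold mpiPingpongGetLargestNonoverlappingGroups mpiPingpongGetLargestNonoverlappingGroups_alt
  rw [pvBridgeB]
  have hfun : (fun n => PySem.Set.contains (PySem.Set.empty : PySem.Set Int) n)
      = (fun (_ : Int) => false) := by
    funext n; exact pvContainsEmpty n
  rw [hfun]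
  rw [pvMain (groups.length + 1) groups [] PySem.Set.empty hpre
    (fun g _ n _ => pvContainsEmpty n) (by omega)]
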